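-- pv_equiv track=rewrite | github.com/Landcruiser87/Capstone_Project | analysis/zg_layer_generator_01.py | Invalid_ConvLSTM2D
-- ===== SOURCE A (Python) =====
-- def Invalid_ConvLSTM2D(model):
-- 	clstm_indices = [i for i,d in enumerate(model) if d == 'ConvLSTM2D']
--
-- 	if len(clstm_indices) > 0:
-- 		#No RNN style before it
-- 		gru_indices = [i for i,d in enumerate(model) if d == 'GRU']
-- 		for cli in clstm_indices:
-- 			if len([fi for fi in gru_indices if fi < cli]) > 0:
-- 				return True
--
-- 		lstm_indices = [i for i,d in enumerate(model) if d == 'LSTM']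
-- 		for cli in clstm_indices:
-- 			if len([fi for fi in lstm_indices if fi < cli]) > 0:
-- 				return True
--
-- 		blstm_indices = [i for i,d in enumerate(model) if d == 'BidirectionalLSTM']
-- 		for cli in clstm_indices:
-- 			if len([fi for fi in blstm_indices if fi < cli]) > 0:
-- 				return True
--
-- 		bgru_indices = [i for i,d in enumerate(model) if d == 'BidirectionalGRU']
-- 		for cli in clstm_indices:
-- 			if len([fi for fi in bgru_indices if fi < cli]) > 0:
-- 				return True
--
-- 		#No flatten before it
-- 		flatten_indices = [i for i,d in enumerate(model) if d == 'Flatten']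
-- 		for cli in clstm_indices:
-- 			if len([fi for fi in flatten_indices if fi < cli]) > 0:
-- 				return True
--
-- 		#Must have at least one flatten
-- 		if len(flatten_indices) == 0:
-- 			return True
--
-- 		#No dense before it
-- 		dense_indices = [i for i,d in enumerate(model) if d == 'Dense']
-- 		for cli in clstm_indices:
-- 			if len([di for di in dense_indices if di < cli]) > 0:
-- 				return True
--
-- 	return False
-- ===== SOURCE B (Python) =====
-- FORBIDDEN = ('GRU', 'LSTM', 'BidirectionalLSTM', 'BidirectionalGRU', 'Flatten', 'Dense')
--
-- def Invalid_ConvLSTM2D(model):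
-- 	last_clstm = None
-- 	first_bad = None
-- 	has_flatten = False
-- 	for i, d in enumerate(model):
-- 		if d == 'ConvLSTM2D':
-- 			last_clstm = i
-- 		if d in FORBIDDEN and first_bad is None:
-- 			first_bad = i
-- 		has_flatten = has_flatten or d == 'Flatten'
-- 	if last_clstm is None:
-- 		return False
-- 	return (first_bad is not None and first_bad < last_clstm) or not has_flatten
-- ===== Notes on version B (the rewrite author's own statement) =====
-- stated objective: simpler
-- what changed: Replaces six enumerate+filter passes and a nested per-ConvLSTM2D scan with a single pass that records the last ConvLSTM2D index, the earliest forbidden-layer index and whether Flatten occurs, then compares once.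
import Mathlib
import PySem

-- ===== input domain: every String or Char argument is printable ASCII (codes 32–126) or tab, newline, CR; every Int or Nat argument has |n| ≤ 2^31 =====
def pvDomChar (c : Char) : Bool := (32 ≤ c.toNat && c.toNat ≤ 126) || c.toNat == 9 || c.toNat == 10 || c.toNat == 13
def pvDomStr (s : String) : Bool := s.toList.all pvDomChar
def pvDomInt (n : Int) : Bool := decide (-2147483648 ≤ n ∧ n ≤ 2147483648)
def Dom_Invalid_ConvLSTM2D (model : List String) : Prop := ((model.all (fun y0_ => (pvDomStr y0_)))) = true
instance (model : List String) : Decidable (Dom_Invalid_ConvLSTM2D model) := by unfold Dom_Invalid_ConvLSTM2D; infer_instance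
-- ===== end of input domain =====

-- B replaces A's six enumerate+filter passes with nested per-index scans by one left-to-right
-- pass recording the last ConvLSTM2D index, the earliest forbidden-layer index and Flatten
-- presence, then compares once (objective: simpler).


-- ===== PORT A =====
-- [i for i,d in enumerate(model) if d == name]
def pvIdxs (name : String) (model : List String) : List Int :=
  ((PySem.List.enumerate model).filter (fun p => p.2 == name)).map (fun p => p.1)

-- "for cli in clstm_indices: if len([fi for fi in fis if fi < cli]) > 0: return True"
def pvAnyBefore (clstm_indices fis : List Int) : Bool :=
  clstm_indices.any (fun cli => decide (0 < (fis.filter (fun fi => decide (fi < cli))).length))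

def Invalid_ConvLSTM2D (model : List String) : Bool :=
  let clstm_indices := pvIdxs "ConvLSTM2D" model
  if 0 < clstm_indices.length then
    let gru_indices := pvIdxs "GRU" model
    if pvAnyBefore clstm_indices gru_indices then true else
    let lstm_indices := pvIdxs "LSTM" model
    if pvAnyBefore clstm_indices lstm_indices then true else
    let blstm_indices := pvIdxs "BidirectionalLSTM" model
    if pvAnyBefore clstm_indices blstm_indices then true else
    let bgru_indices := pvIdxs "BidirectionalGRU" model
    if pvAnyBefore clstm_indices bgru_indices then true else
    let flatten_indices := pvIdxs "Flatten" model
    if pvAnyBefore clstm_indices flatten_indices then true else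
    if flatten_indices.length = 0 then true else
    let dense_indices := pvIdxs "Dense" model
    if pvAnyBefore clstm_indices dense_indices then true else
    false
  else false

-- ===== PORT B =====
-- d in FORBIDDEN
def pvIsForbidden (d : String) : Bool :=
  d == "GRU" || d == "LSTM" || d == "BidirectionalLSTM" || d == "BidirectionalGRU" ||
  d == "Flatten" || d == "Dense"

-- one iteration of Source B's loop; state = (last_clstm, first_bad, has_flatten)
def pvStep (st : Option Int × Option Int × Bool) (p : Int × String) :
    Option Int × Option Int × Bool :=
  ((if p.2 == "ConvLSTM2D" then some p.1 else st.1),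
   (if pvIsForbidden p.2 && st.2.1.isNone then some p.1 else st.2.1),
   (st.2.2 || p.2 == "Flatten"))

def Invalid_ConvLSTM2D_alt (model : List String) : Bool :=
  let st := (PySem.List.enumerate model).foldl pvStep (none, none, false)
  match st.1 with
  | none => false
  | some c =>
    (match st.2.1 with
     | some b => decide (b < c)
     | none => false) || !st.2.2

-- ===== PRECONDITION & SPEC =====
def Spec_Invalid_ConvLSTM2D (model : List String) (out : Bool) : Prop := out = Invalid_ConvLSTM2D_alt model
instance (model : List String) (out : Bool) : Decidable (Spec_Invalid_ConvLSTM2D model out) := by unfold Spec_Invalid_ConvLSTM2D; infer_instance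

-- ===== CLAIM (what is proved, stated in full; the proofs are below) =====
def Claim_equal_Invalid_ConvLSTM2D : Prop := ∀ (model : List String), Dom_Invalid_ConvLSTM2D model → Spec_Invalid_ConvLSTM2D model (Invalid_ConvLSTM2D model)

-- ===== LEMMAS AND PROOFS =====

-- the three components of Source B's loop state, iterated separately
def pvStepC (a : Option Int) (p : Int × String) : Option Int :=
  if p.2 == "ConvLSTM2D" then some p.1 else a
def pvStepB (b : Option Int) (p : Int × String) : Option Int :=
  if pvIsForbidden p.2 && b.isNone then some p.1 else b
def pvStepF (f : Bool) (p : Int × String) : Bool :=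
  f || p.2 == "Flatten"

lemma pvFold_split (e : List (Int × String)) :
    ∀ a b f, e.foldl pvStep (a, b, f) = (e.foldl pvStepC a, e.foldl pvStepB b, e.foldl pvStepF f) := by
  induction e with
  | nil => intro a b f; rfl
  | cons p e ih => intro a b f; simpa [pvStep, pvStepC, pvStepB, pvStepF] using ih _ _ _

lemma pvFoldC (e : List (Int × String)) :
    ∀ a, e.foldl pvStepC a =
      (match e.reverse.find? (fun p => p.2 == "ConvLSTM2D") with
       | some p => some p.1
       | none => a) := by
  induction e with
  | nil => intro a; rfl
  | cons p e ih =>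
    intro a
    rw [List.foldl_cons, ih, List.reverse_cons, List.find?_append]
    cases h : e.reverse.find? (fun p => p.2 == "ConvLSTM2D") with
    | some q => rfl
    | none => by_cases hc : p.2 == "ConvLSTM2D" <;> simp [pvStepC, List.find?, hc]

lemma pvFoldB_some (e : List (Int × String)) (v : Int) :
    e.foldl pvStepB (some v) = some v := by
  induction e with
  | nil => rfl
  | cons p e ih => simpa [pvStepB] using ih

lemma pvFoldB (e : List (Int × String)) :
    e.foldl pvStepB none = (e.find? (fun p => pvIsForbidden p.2)).map (fun p => p.1) := by
  induction e with
  | nil => rfl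
  | cons p e ih =>
    by_cases h : pvIsForbidden p.2
    · simp [pvStepB, h, List.find?, pvFoldB_some]
    · simp [pvStepB, h, List.find?, ih]

lemma pvFoldF (e : List (Int × String)) :
    ∀ f, e.foldl pvStepF f = (f || e.any (fun p => p.2 == "Flatten")) := by
  induction e with
  | nil => intro f; simp
  | cons p e ih => intro f; simp [pvStepF, ih, Bool.or_assoc]

-- in a fst-strictly-increasing list, find? returns a fst-minimal match
lemma pvFind_min {e : List (Int × String)} {P : Int × String → Bool} {p : Int × String}
    (hinc : e.Pairwise (fun p q => p.1 < q.1)) (h : e.find? P = some p) :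
    ∀ q ∈ e, P q = true → p.1 ≤ q.1 := by
  obtain ⟨hp, as, bs, heq, hno⟩ := List.find?_eq_some_iff_append.mp h
  subst heq
  intro q hq hPq
  rcases List.mem_append.mp hq with hq | hq
  · exact absurd hPq (by simpa using hno q hq)
  · rcases List.mem_cons.mp hq with rfl | hq
    · exact le_refl _
    · exact le_of_lt (List.rel_of_pairwise_cons (List.pairwise_append.mp hinc).2.1 hq)

-- in a fst-strictly-increasing list, find? on the reverse returns a fst-maximal match
lemma pvRevFind_max {e : List (Int × String)} {P : Int × String → Bool} {p : Int × String}
    (hinc : e.Pairwise (fun p q => p.1 < q.1)) (h : e.reverse.find? P = some p) :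
    ∀ q ∈ e, P q = true → q.1 ≤ p.1 := by
  have hdec : e.reverse.Pairwise (fun a b => b.1 < a.1) := List.pairwise_reverse.mpr hinc
  obtain ⟨hp, as, bs, heq, hno⟩ := List.find?_eq_some_iff_append.mp h
  intro q hq hPq
  have hq' : q ∈ e.reverse := by simpa using hq
  rw [heq] at hq' hdec
  rcases List.mem_append.mp hq' with hq' | hq'
  · exact absurd hPq (by simpa using hno q hq')
  · rcases List.mem_cons.mp hq' with rfl | hq'
    · exact le_refl _
    · exact le_of_lt (List.rel_of_pairwise_cons (List.pairwise_append.mp hdec).2.1 hq')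

-- membership characterization of A's comprehensions
lemma pvIdxs_mem (name : String) (model : List String) (x : Int) :
    x ∈ pvIdxs name model ↔
      ∃ p ∈ PySem.List.enumerate model, p.2 = name ∧ p.1 = x := by
  simp only [pvIdxs, List.mem_map, List.mem_filter, beq_iff_eq]
  constructor
  · rintro ⟨⟨a, b⟩, ⟨hmem, hname⟩, rfl⟩; exact ⟨(a, b), hmem, hname, rfl⟩
  · rintro ⟨⟨a, b⟩, hmem, hname, rfl⟩; exact ⟨(a, b), ⟨hmem, hname⟩, rfl⟩

lemma pvIdxs_pos (name : String) (model : List String) :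
    0 < (pvIdxs name model).length ↔ ∃ p ∈ PySem.List.enumerate model, p.2 = name := by
  rw [List.length_pos_iff_exists_mem]
  constructor
  · rintro ⟨x, hx⟩; obtain ⟨p, hp, hn, _⟩ := (pvIdxs_mem name model x).mp hx; exact ⟨p, hp, hn⟩
  · rintro ⟨p, hp, hn⟩; exact ⟨p.1, (pvIdxs_mem name model p.1).mpr ⟨p, hp, hn, rfl⟩⟩

lemma pvAnyBefore_iff (name : String) (model : List String) :
    pvAnyBefore (pvIdxs "ConvLSTM2D" model) (pvIdxs name model) = true ↔
      ∃ q ∈ PySem.List.enumerate model, q.2 = "ConvLSTM2D" ∧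
        ∃ p ∈ PySem.List.enumerate model, p.2 = name ∧ p.1 < q.1 := by
  simp only [pvAnyBefore, List.any_eq_true, decide_eq_true_eq,
    List.length_pos_iff_exists_mem, List.mem_filter]
  constructor
  · rintro ⟨cli, hcli, fi, hfi, hlt⟩
    obtain ⟨q, hq, hqn, rfl⟩ := (pvIdxs_mem _ model cli).mp hcli
    obtain ⟨p, hp, hpn, rfl⟩ := (pvIdxs_mem _ model fi).mp hfi
    exact ⟨q, hq, hqn, p, hp, hpn, by simpa using hlt⟩
  · rintro ⟨q, hq, hqn, p, hp, hpn, hlt⟩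
    exact ⟨q.1, (pvIdxs_mem _ model q.1).mpr ⟨q, hq, hqn, rfl⟩,
      p.1, ⟨(pvIdxs_mem _ model p.1).mpr ⟨p, hp, hpn, rfl⟩, by simpa using hlt⟩⟩

lemma pvForbidden_iff (d : String) :
    pvIsForbidden d = true ↔
      d = "GRU" ∨ d = "LSTM" ∨ d = "BidirectionalLSTM" ∨ d = "BidirectionalGRU" ∨
      d = "Flatten" ∨ d = "Dense" := by
  simp only [pvIsForbidden, Bool.or_eq_true, beq_iff_eq]
  tauto

lemma pvBadName (model : List String) (name : String)
    (h : pvAnyBefore (pvIdxs "ConvLSTM2D" model) (pvIdxs name model) = true)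
    (hf : pvIsForbidden name = true) :
    ∃ q ∈ PySem.List.enumerate model, q.2 = "ConvLSTM2D" ∧
      ∃ p ∈ PySem.List.enumerate model, pvIsForbidden p.2 = true ∧ p.1 < q.1 := by
  obtain ⟨q, hq, hqn, p, hp, hpn, hlt⟩ := (pvAnyBefore_iff name model).mp h
  exact ⟨q, hq, hqn, p, hp, by rw [hpn]; exact hf, hlt⟩

-- A returns true iff: a ConvLSTM2D exists, and (a forbidden layer sits strictly before
-- some ConvLSTM2D, or no Flatten exists at all)
lemma pvA_iff (model : List String) :
    Invalid_ConvLSTM2D model = true ↔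
      (∃ q ∈ PySem.List.enumerate model, q.2 = "ConvLSTM2D") ∧
      ((∃ q ∈ PySem.List.enumerate model, q.2 = "ConvLSTM2D" ∧
          ∃ p ∈ PySem.List.enumerate model, pvIsForbidden p.2 = true ∧ p.1 < q.1) ∨
        ¬ ∃ p ∈ PySem.List.enumerate model, p.2 = "Flatten") := by
  simp only [Invalid_ConvLSTM2D]
  split_ifs with h0 h1 h2 h3 h4 h5 h6 h7
  · exact iff_of_true rfl ⟨(pvIdxs_pos _ model).mp h0, Or.inl (pvBadName model "GRU" h1 (by decide))⟩
  · exact iff_of_true rfl ⟨(pvIdxs_pos _ model).mp h0, Or.inl (pvBadName model "LSTM" h2 (by decide))⟩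
  · exact iff_of_true rfl ⟨(pvIdxs_pos _ model).mp h0, Or.inl (pvBadName model "BidirectionalLSTM" h3 (by decide))⟩
  · exact iff_of_true rfl ⟨(pvIdxs_pos _ model).mp h0, Or.inl (pvBadName model "BidirectionalGRU" h4 (by decide))⟩
  · exact iff_of_true rfl ⟨(pvIdxs_pos _ model).mp h0, Or.inl (pvBadName model "Flatten" h5 (by decide))⟩
  · refine iff_of_true rfl ⟨(pvIdxs_pos _ model).mp h0, Or.inr ?_⟩
    rintro ⟨p, hp, hp2⟩
    have := (pvIdxs_pos "Flatten" model).mpr ⟨p, hp, hp2⟩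
    omega
  · exact iff_of_true rfl ⟨(pvIdxs_pos _ model).mp h0, Or.inl (pvBadName model "Dense" h7 (by decide))⟩
  · refine iff_of_false (by simp) ?_
    rintro ⟨-, hbad | hnoF⟩
    · obtain ⟨q, hq, hq2, p, hp, hpF, hlt⟩ := hbad
      rcases (pvForbidden_iff p.2).mp hpF with h | h | h | h | h | h
      · exact h1 ((pvAnyBefore_iff _ model).mpr ⟨q, hq, hq2, p, hp, h, hlt⟩)
      · exact h2 ((pvAnyBefore_iff _ model).mpr ⟨q, hq, hq2, p, hp, h, hlt⟩)
      · exact h3 ((pvAnyBefore_iff _ model).mpr ⟨q, hq, hq2, p, hp, h, hlt⟩)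
      · exact h4 ((pvAnyBefore_iff _ model).mpr ⟨q, hq, hq2, p, hp, h, hlt⟩)
      · exact h5 ((pvAnyBefore_iff _ model).mpr ⟨q, hq, hq2, p, hp, h, hlt⟩)
      · exact h7 ((pvAnyBefore_iff _ model).mpr ⟨q, hq, hq2, p, hp, h, hlt⟩)
    · have hpos : 0 < (pvIdxs "Flatten" model).length := by omega
      exact hnoF ((pvIdxs_pos "Flatten" model).mp hpos)
  · refine iff_of_false (by simp) ?_
    rintro ⟨hex, -⟩
    exact h0 ((pvIdxs_pos _ model).mpr hex)

-- B returns true iff the same predicate holds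
lemma pvB_iff (model : List String) :
    Invalid_ConvLSTM2D_alt model = true ↔
      (∃ q ∈ PySem.List.enumerate model, q.2 = "ConvLSTM2D") ∧
      ((∃ q ∈ PySem.List.enumerate model, q.2 = "ConvLSTM2D" ∧
          ∃ p ∈ PySem.List.enumerate model, pvIsForbidden p.2 = true ∧ p.1 < q.1) ∨
        ¬ ∃ p ∈ PySem.List.enumerate model, p.2 = "Flatten") := by
  have hinc := PySem.List.pairwise_lt_enumerate model 0
  unfold Invalid_ConvLSTM2D_alt
  simp only [pvFold_split, pvFoldC, pvFoldB, pvFoldF, Bool.false_or]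
  cases hC : (PySem.List.enumerate model).reverse.find? (fun p => p.2 == "ConvLSTM2D") with
  | none =>
    refine iff_of_false (by simp) ?_
    rintro ⟨⟨q, hq, hq2⟩, -⟩
    have := List.find?_eq_none.mp hC q (by simpa using hq)
    simp [hq2] at this
  | some qc =>
    have hqc_mem : qc ∈ PySem.List.enumerate model := by
      have := List.mem_of_find?_eq_some hC; simpa using this
    have hqc_P : qc.2 = "ConvLSTM2D" := by
      have := List.find?_some hC; simpa using this
    have hmax := pvRevFind_max hinc hC
    cases hB : (PySem.List.enumerate model).find? (fun p => pvIsForbidden p.2) with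
    | none =>
      have hnoB : ∀ p ∈ PySem.List.enumerate model, ¬ pvIsForbidden p.2 = true := by
        intro p hp; simpa using List.find?_eq_none.mp hB p hp
      simp only [Option.map_none, Bool.false_or, Bool.not_eq_true', List.any_eq_false]
      constructor
      · intro h
        exact ⟨⟨qc, hqc_mem, hqc_P⟩, Or.inr (by rintro ⟨p, hp, hp2⟩; exact h p hp (by simpa using hp2))⟩
      · rintro ⟨-, hbad | hnoF⟩
        · obtain ⟨q, hq, hq2, p, hp, hpF, hlt⟩ := hbad
          exact absurd hpF (hnoB p hp)
        · intro p hp hp2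
          exact hnoF ⟨p, hp, by simpa using hp2⟩
    | some pb =>
      have hpb_mem : pb ∈ PySem.List.enumerate model := List.mem_of_find?_eq_some hB
      have hpb_P : pvIsForbidden pb.2 = true := by
        have := List.find?_some hB; simpa using this
      have hmin := pvFind_min hinc hB
      simp only [Option.map_some, Bool.or_eq_true, decide_eq_true_eq,
        Bool.not_eq_true', List.any_eq_false]
      constructor
      · rintro (hlt | hnoF)
        · exact ⟨⟨qc, hqc_mem, hqc_P⟩, Or.inl ⟨qc, hqc_mem, hqc_P, pb, hpb_mem, hpb_P, hlt⟩⟩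
        · exact ⟨⟨qc, hqc_mem, hqc_P⟩, Or.inr (by rintro ⟨p, hp, hp2⟩; exact hnoF p hp (by simpa using hp2))⟩
      · rintro ⟨-, hbad | hnoF⟩
        · obtain ⟨q, hq, hq2, p, hp, hpF, hlt⟩ := hbad
          refine Or.inl ?_
          have h1 : pb.1 ≤ p.1 := hmin p hp hpF
          have h2 : q.1 ≤ qc.1 := hmax q hq (by simp [hq2])
          omega
        · exact Or.inr (fun p hp hp2 => hnoF ⟨p, hp, by simpa using hp2⟩)

-- ===== VERDICT (by name: the statement is the Claim_ definition above) =====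
theorem Invalid_ConvLSTM2D_spec : Claim_equal_Invalid_ConvLSTM2D := by
  intro model _
  unfold Spec_Invalid_ConvLSTM2D
  exact Bool.coe_iff_coe.mp ((pvA_iff model).trans (pvB_iff model).symm)
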